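-- pv_equiv track=rewrite | github.com/mariebergan/Hospital | Model/modelFuncs.py | countAbsence
-- ===== SOURCE A (Python) =====
-- def countAbsence(attrs):
--     absenceCount = 0
--     HCW = []
--     isoNodes = {}
--     for node in attrs:
--         if attrs[node]['HCW']:
--             HCW.append(node)
--     for node in HCW:
--         if attrs[node]['present'] == False:
--             absenceCount += 1
--     return absenceCount
-- ===== SOURCE B (Python) =====
-- def countAbsence(attrs):
--     # Complementary counting: absent HCW = all HCW minus HCW marked present.
--     # Single loop maintaining two counters; result by subtraction at the end.
--     hcwTotal = 0
--     hcwPresent = 0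
--     for d in attrs.values():
--         if d['HCW']:
--             hcwTotal += 1
--             if d['present'] != False:
--                 hcwPresent += 1
--     return hcwTotal - hcwPresent
-- ===== Notes on version B (the rewrite author's own statement) =====
-- stated objective: alternative
-- what changed: A builds an HCW key list and rescans it with dict lookups to count absences directly; B counts by complement in one pass over the values, maintaining two counters (all HCW, HCW marked present) and returning their difference, with no intermediate list or repeated lookup.
import Mathlib
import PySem

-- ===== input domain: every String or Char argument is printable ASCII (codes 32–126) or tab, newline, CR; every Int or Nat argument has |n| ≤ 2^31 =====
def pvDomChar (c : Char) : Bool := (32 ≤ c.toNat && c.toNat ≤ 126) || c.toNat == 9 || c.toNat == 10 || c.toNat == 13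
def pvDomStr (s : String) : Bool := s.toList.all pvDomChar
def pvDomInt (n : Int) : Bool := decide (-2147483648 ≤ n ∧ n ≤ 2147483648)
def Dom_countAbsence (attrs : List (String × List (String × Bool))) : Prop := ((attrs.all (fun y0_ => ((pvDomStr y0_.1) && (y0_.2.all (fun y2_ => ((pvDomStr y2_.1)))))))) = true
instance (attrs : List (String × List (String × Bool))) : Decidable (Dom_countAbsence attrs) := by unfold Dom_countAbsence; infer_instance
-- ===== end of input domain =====

-- B replaces A's build-HCW-list-then-rescan with complementary counting in one pass (all HCW minus present HCW, subtracted at the end); objective: alternative.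
-- Pre_ excludes assoc lists with duplicate node keys (they do not represent a Python dict) and inner dicts
-- missing the 'HCW' key (or 'present' for an HCW node), on which Python A raises KeyError.


-- ===== PORT A =====
-- attrs is a Python dict; attrs[node] is ported as (PySem.Dict.mk attrs).getD node []
-- (first-match lookup; the default is only reached outside Pre_, where Python raises KeyError).
def countAbsence (attrs : List (String × List (String × Bool))) : Int :=
  let absenceCount : Int := 0
  let HCW : List String :=
    attrs.foldl (fun acc node =>
      if (PySem.Dict.mk ((PySem.Dict.mk attrs).getD node.1 [])).getD "HCW" false then
        acc ++ [node.1]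
      else acc) []
  HCW.foldl (fun c node =>
    if (PySem.Dict.mk ((PySem.Dict.mk attrs).getD node [])).getD "present" true = false then
      c + 1
    else c) absenceCount

-- ===== PORT B =====
-- one pass over the values, pair of counters (hcwTotal, hcwPresent), subtraction at the end
def countAbsence_alt (attrs : List (String × List (String × Bool))) : Int :=
  let s : Int × Int :=
    attrs.foldl (fun (s : Int × Int) node =>
      if (PySem.Dict.mk node.2).getD "HCW" false then
        (s.1 + 1,
         if (PySem.Dict.mk node.2).getD "present" true ≠ false then s.2 + 1 else s.2)
      else s) (0, 0)
  s.1 - s.2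

-- ===== PRECONDITION & SPEC =====
-- Pre_ excludes: duplicate outer keys (an assoc list no Python dict equals); and inner
-- dicts where 'HCW' is missing, or 'present' is missing while 'HCW' is truthy (KeyError in A and B).
def Pre_countAbsence (attrs : List (String × List (String × Bool))) : Prop :=
  (attrs.map (·.1)).Nodup ∧
  ∀ p ∈ attrs, (PySem.Dict.mk p.2).contains "HCW" = true ∧
    ((PySem.Dict.mk p.2).getD "HCW" false = true → (PySem.Dict.mk p.2).contains "present" = true)
instance (attrs : List (String × List (String × Bool))) : Decidable (Pre_countAbsence attrs) := by
  unfold Pre_countAbsence; infer_instance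

def pvWitness_countAbsence : (List (String × List (String × Bool))) :=
  [("a", [("HCW", true), ("present", false)]), ("b", [("HCW", false)])]

def Spec_countAbsence (attrs : List (String × List (String × Bool))) (out : Int) : Prop := out = countAbsence_alt attrs
instance (attrs : List (String × List (String × Bool))) (out : Int) : Decidable (Spec_countAbsence attrs out) := by unfold Spec_countAbsence; infer_instance

-- ===== CLAIM (what is proved, stated in full; the proofs are below) =====
def Claim_equal_countAbsence : Prop := ∀ (attrs : List (String × List (String × Bool))), Dom_countAbsence attrs → Pre_countAbsence attrs → Spec_countAbsence attrs (countAbsence attrs)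

-- ===== LEMMAS AND PROOFS =====

-- A's two passes, with the full-dict lookup replaced pointwise by the pair's own value
-- (valid under Nodup keys), fold to a single direct-count pass.
theorem countAbsence_fuse (g : String → List (String × Bool))
    (l : List (String × List (String × Bool))) (acc : List String) (c : Int)
    (hg : ∀ p ∈ l, g p.1 = p.2) :
    ((l.foldl (fun a p => if (PySem.Dict.mk (g p.1)).getD "HCW" false then a ++ [p.1] else a) acc).foldl
        (fun c node => if (PySem.Dict.mk (g node)).getD "present" true = false then c + 1 else c) c)
    = l.foldl (fun c p =>
        if (PySem.Dict.mk p.2).getD "HCW" false ∧ (PySem.Dict.mk p.2).getD "present" true = false then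
          c + 1
        else c)
        (acc.foldl (fun c node => if (PySem.Dict.mk (g node)).getD "present" true = false then c + 1 else c) c) := by
  induction l generalizing acc c with
  | nil => rfl
  | cons p l ih =>
    have hp : g p.1 = p.2 := hg p (List.mem_cons_self ..)
    have hg' : ∀ q ∈ l, g q.1 = q.2 := fun q hq => hg q (List.mem_cons_of_mem _ hq)
    simp only [List.foldl_cons, hp]
    cases h1 : (PySem.Dict.mk p.2).getD "HCW" false with
    | true =>
      simp only [if_true, ih _ _ hg', List.foldl_append, List.foldl_cons,
        List.foldl_nil, hp, true_and]
    | false =>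
      simp only [Bool.false_eq_true, if_false, false_and]
      exact ih _ _ hg'

theorem countAbsence_lookup_eq (attrs : List (String × List (String × Bool)))
    (hnd : (attrs.map (·.1)).Nodup) :
    ∀ p ∈ attrs, (PySem.Dict.mk attrs).getD p.1 [] = p.2 := by
  intro p hp
  have hkeys : (PySem.Dict.mk attrs).keys.Nodup := by
    simpa [PySem.Dict.keys] using hnd
  exact PySem.Dict.getD_of_mem_items _ (by simpa using hp) hkeys []

-- B's two-counter pass computes the direct count by subtraction: the difference of the pair
-- is invariant under 'present' HCW nodes and grows with absent HCW nodes.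
theorem countAbsence_complement (l : List (String × List (String × Bool))) (t p : Int) :
    (l.foldl (fun (s : Int × Int) node =>
        if (PySem.Dict.mk node.2).getD "HCW" false then
          (s.1 + 1,
           if (PySem.Dict.mk node.2).getD "present" true ≠ false then s.2 + 1 else s.2)
        else s) (t, p)).1
    - (l.foldl (fun (s : Int × Int) node =>
        if (PySem.Dict.mk node.2).getD "HCW" false then
          (s.1 + 1,
           if (PySem.Dict.mk node.2).getD "present" true ≠ false then s.2 + 1 else s.2)
        else s) (t, p)).2
    = l.foldl (fun c q =>
        if (PySem.Dict.mk q.2).getD "HCW" false ∧ (PySem.Dict.mk q.2).getD "present" true = false then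
          c + 1
        else c) (t - p) := by
  induction l generalizing t p with
  | nil => rfl
  | cons q l ih =>
    simp only [List.foldl_cons]
    cases h1 : (PySem.Dict.mk q.2).getD "HCW" false with
    | true =>
      cases h2 : (PySem.Dict.mk q.2).getD "present" true with
      | false =>
        simp only [if_true, ne_eq, not_true_eq_false, if_false, ih, true_and]
        ring_nf
      | true =>
        have := ih (t + 1) (p + 1)
        simp only [if_true, ne_eq, Bool.true_eq_false, not_false_eq_true, if_true, this,
          true_and]
        norm_num
    | false =>
      simp only [Bool.false_eq_true, if_false, false_and, ih]

-- ===== VERDICT (by name: the statement is the Claim_ definition above) =====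
theorem countAbsence_spec : Claim_equal_countAbsence := by
  intro attrs _ hpre
  unfold Spec_countAbsence countAbsence countAbsence_alt
  have h1 := countAbsence_fuse (fun k => (PySem.Dict.mk attrs).getD k []) attrs [] 0
    (countAbsence_lookup_eq attrs hpre.1)
  have h2 := countAbsence_complement attrs 0 0
  simp only [List.foldl_nil, sub_zero] at h1 h2
  rw [h1, ← h2]
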